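-- pv_equiv track=rewrite | github.com/skybridgecx-code/crypto | src/crypto_agent/cli/matrix.py | _walk_forward_slice_boundaries
-- ===== SOURCE A (Python) =====
-- MATRIX_WALK_FORWARD_SLICE_COUNT = 3
--
-- def _walk_forward_slice_boundaries(candle_count: int) -> list[tuple[int, int]]:
--     if candle_count <= 0:
--         return []
--     slice_count = min(MATRIX_WALK_FORWARD_SLICE_COUNT, candle_count)
--     base, remainder = divmod(candle_count, slice_count)
--     boundaries: list[tuple[int, int]] = []
--     start = 0
--     for index in range(slice_count):
--         width = base + (1 if index < remainder else 0)
--         end = start + width - 1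
--         boundaries.append((start, end))
--         start = end + 1
--     return boundaries
-- ===== SOURCE B (Python) =====
-- MATRIX_WALK_FORWARD_SLICE_COUNT = 3
--
--
-- def _walk_forward_slice_boundaries(candle_count: int) -> list[tuple[int, int]]:
--     if candle_count <= 0:
--         return []
--     slice_count = min(MATRIX_WALK_FORWARD_SLICE_COUNT, candle_count)
--     base, remainder = divmod(candle_count, slice_count)
--     return [
--         (i * base + min(i, remainder),
--          i * base + min(i, remainder) + base + (1 if i < remainder else 0) - 1)
--         for i in range(slice_count)
--     ]
-- ===== Notes on version B (the rewrite author's own statement) =====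
-- stated objective: alternative
-- what changed: Replaces the stateful loop that threads a running 'start' across iterations with a stateless comprehension computing each slice's boundaries in closed form (start = i*base + min(i, remainder)).
import Mathlib
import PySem

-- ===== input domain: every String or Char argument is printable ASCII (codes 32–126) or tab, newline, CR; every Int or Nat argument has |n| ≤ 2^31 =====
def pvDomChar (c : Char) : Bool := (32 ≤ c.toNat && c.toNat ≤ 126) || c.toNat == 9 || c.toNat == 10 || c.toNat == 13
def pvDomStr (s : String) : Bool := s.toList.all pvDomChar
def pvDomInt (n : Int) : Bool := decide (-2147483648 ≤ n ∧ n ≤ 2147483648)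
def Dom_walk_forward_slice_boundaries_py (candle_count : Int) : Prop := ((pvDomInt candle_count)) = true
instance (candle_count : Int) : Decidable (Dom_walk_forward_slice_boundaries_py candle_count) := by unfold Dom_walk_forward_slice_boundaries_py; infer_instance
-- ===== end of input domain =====

-- ===== PORT A =====
-- B computes each slice boundary in closed form (no running start) instead of A's stateful loop; same values, same cost.
def walk_forward_slice_boundaries_py (candle_count : Int) : List (Int × Int) :=
  if candle_count ≤ 0 then []
  else
    let slice_count : Int := min 3 candle_count
    let base : Int := PySem.Int.floordiv candle_count slice_count
    let remainder : Int := PySem.Int.mod candle_count slice_count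
    ((PySem.List.pyRange 0 slice_count 1).foldl
      (fun (st : List (Int × Int) × Int) (index : Int) =>
        let width := base + (if index < remainder then 1 else 0)
        let e := st.2 + width - 1
        (st.1 ++ [(st.2, e)], e + 1))
      ([], 0)).1

-- ===== PORT B =====
def walk_forward_slice_boundaries_py_alt (candle_count : Int) : List (Int × Int) :=
  if candle_count ≤ 0 then []
  else
    let slice_count : Int := min 3 candle_count
    let base : Int := PySem.Int.floordiv candle_count slice_count
    let remainder : Int := PySem.Int.mod candle_count slice_count
    (PySem.List.pyRange 0 slice_count 1).map (fun i =>
      (i * base + min i remainder,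
       i * base + min i remainder + base + (if i < remainder then 1 else 0) - 1))

-- ===== PRECONDITION & SPEC =====
def Spec_walk_forward_slice_boundaries_py (candle_count : Int) (out : List (Int × Int)) : Prop := out = walk_forward_slice_boundaries_py_alt candle_count
instance (candle_count : Int) (out : List (Int × Int)) : Decidable (Spec_walk_forward_slice_boundaries_py candle_count out) := by unfold Spec_walk_forward_slice_boundaries_py; infer_instance

-- ===== CLAIM (what is proved, stated in full; the proofs are below) =====
def Claim_equal_walk_forward_slice_boundaries_py : Prop := ∀ (candle_count : Int), Dom_walk_forward_slice_boundaries_py candle_count → Spec_walk_forward_slice_boundaries_py candle_count (walk_forward_slice_boundaries_py candle_count)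

-- ===== LEMMAS AND PROOFS =====

-- ===== VERDICT (by name: the statement is the Claim_ definition above) =====
theorem walk_forward_slice_boundaries_py_spec : Claim_equal_walk_forward_slice_boundaries_py := by
  intro n _
  unfold Spec_walk_forward_slice_boundaries_py
  unfold walk_forward_slice_boundaries_py walk_forward_slice_boundaries_py_alt
  by_cases h0 : n ≤ 0
  · simp [h0]
  · simp only [if_neg h0]
    by_cases h1 : n = 1
    · subst h1; decide
    · by_cases h2 : n = 2
      · subst h2; decide
      · have h3 : (3:Int) ≤ n := by omega
        have hmin : min (3:Int) n = 3 := by omega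
        rw [hmin]
        have hb : PySem.Int.floordiv n 3 = n / 3 := PySem.Int.floordiv_eq_ediv_of_pos (by norm_num)
        have hr : PySem.Int.mod n 3 = n % 3 := PySem.Int.mod_eq_emod_of_pos (by norm_num)
        rw [hb, hr]
        have hrange : PySem.List.pyRange 0 3 1 = [0, 1, 2] := by decide
        rw [hrange]
        simp only [List.foldl, List.map, List.nil_append, List.cons_append, List.cons.injEq, Prod.mk.injEq, and_true]
        simp only [min_def]
        split_ifs <;> omega
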